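-- pv_equiv track=rewrite | github.com/alexandraback/datacollection | solutions_5646553574277120_0/Python/Lowik/ProblemC.py | solveCAlgo
-- ===== SOURCE A (Python) =====
-- import itertools
--
-- def findsubsets(S,m):
--     return set(itertools.combinations(S, m))
--
-- def getAllPossibleSums(Ds) :
--     Ds = set(Ds)
--     possible_values = set()
--     for n in range(1, len(Ds) + 1) :
--         subset = findsubsets(Ds, n)
--         for s in subset :
--             possible_values.add(sum(s))
--     return possible_values
--
-- def GetMissingPossibleSums(sums, V) :
--     sorted_sums = sorted(sums)
--     prev = 0
--     for s in sorted_sums :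
--         if s != prev + 1:
--             return prev + 1
--         else :
--             prev = s
--         if s >= V :
--             return -1
--     if prev < V :
--         return prev+1
--     return -1
--
-- def solveCAlgo(C, Ds, V) :
--     new = 0
--     done = False
--     while not done :
--         possible_values = getAllPossibleSums(Ds)
--         miss = GetMissingPossibleSums(possible_values, V)
--         if miss == -1 :
--             return new
--         else :
--             new += 1
--             Ds += [miss]
-- ===== SOURCE B (Python) =====
-- def solveCAlgo(C, Ds, V):
--     # Greedy "coin patching": scan the distinct denominations in increasing
--     # order, extending the covered prefix [1..covered]; whenever the next coin
--     # leaves a gap, the first uncoverable value is covered+1.  Repeatedly add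
--     # that value until [1..V] is covered, counting the additions.
--     # (Unlike A, never mutates the caller's Ds list.)
--     coins = sorted(set(Ds))
--     added = 0
--     while True:
--         covered = 0
--         for d in coins:
--             if d > covered + 1:
--                 break
--             covered += d
--         if covered >= V:
--             return added
--         coins.append(covered + 1)
--         coins.sort()
--         added += 1
-- ===== Notes on version B (the rewrite author's own statement) =====
-- stated objective: faster
-- what changed: A enumerates all 2^n subset sums of the denomination set on every round and scans the sorted sums for the first gap; B finds that first gap directly by a greedy linear scan of the sorted distinct denominations (covered-prefix invariant), so no subset enumeration ever happens.
-- intended difference: For V <= 0 with a non-empty Ds not containing 1, A first patches in the coin 1 and only then notices nothing is required and returns 1; B returns 0, the intended answer, since no sums 1..V are required when V <= 0. — e.g. on solveCAlgo(0, [2], 0): A returns 1, B returns 0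
import Mathlib
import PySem

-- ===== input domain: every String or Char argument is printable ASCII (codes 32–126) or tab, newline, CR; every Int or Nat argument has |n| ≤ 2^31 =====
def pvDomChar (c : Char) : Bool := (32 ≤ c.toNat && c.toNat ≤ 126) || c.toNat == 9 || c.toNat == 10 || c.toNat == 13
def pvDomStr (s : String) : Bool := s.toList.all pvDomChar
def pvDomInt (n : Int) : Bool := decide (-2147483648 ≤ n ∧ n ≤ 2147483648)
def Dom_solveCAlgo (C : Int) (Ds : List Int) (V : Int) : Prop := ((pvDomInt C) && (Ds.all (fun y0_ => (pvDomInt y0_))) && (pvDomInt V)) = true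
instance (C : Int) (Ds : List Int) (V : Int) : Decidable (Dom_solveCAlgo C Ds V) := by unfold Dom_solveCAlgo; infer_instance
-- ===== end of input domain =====

-- B replaces A's per-round enumeration of all 2^n subset sums by a greedy covered-prefix
-- scan of the sorted distinct denominations (objective: faster, asymptotically).
-- NOTE: A mutates its argument list Ds in place (Ds += [miss]); B does not. The
-- equivalence proved here is about the RETURN value only.

-- ===== PORT A =====
-- itertools.combinations(S, m) over a list (order of tuples irrelevant here: only the set of sums is used)
def pvCombos (xs : List Int) (n : Nat) : List (List Int) :=
  match n, xs with
  | 0, _ => [[]]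
  | _ + 1, [] => []
  | n + 1, x :: t => (pvCombos t n).map (fun l => x :: l) ++ pvCombos t (n + 1)

-- findsubsets(S, m) = set(itertools.combinations(S, m))
def pvFindsubsets (S : List Int) (m : Nat) : PySem.Set (List Int) :=
  PySem.Set.ofList (pvCombos S m)

-- getAllPossibleSums(Ds)
def pvGetAllPossibleSums (Ds : List Int) : PySem.Set Int :=
  let S : PySem.Set Int := PySem.Set.ofList Ds
  (PySem.List.pyRange 1 ((S.length : Int) + 1)).foldl
    (fun pv n => (pvFindsubsets S n.toNat).foldl (fun pv s => PySem.Set.add pv s.sum) pv)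
    PySem.Set.empty

-- the for-loop of GetMissingPossibleSums (prev accumulator, early returns)
def pvGmps : List Int → Int → Int → Int
  | [], prev, V => if prev < V then prev + 1 else -1
  | s :: rest, prev, V =>
      if s ≠ prev + 1 then prev + 1
      else if s ≥ V then -1
      else pvGmps rest s V

def pvGetMissingPossibleSums (sums : PySem.Set Int) (V : Int) : Int :=
  pvGmps (PySem.List.sorted sums (fun x => x)) 0 V

-- the 'while not done' loop of solveCAlgo; the fuel only makes the recursion total
-- (under Pre_ the loop performs at most V+1 rounds, so V.toNat + 2 units never run out)
def pvLoopA : Nat → List Int → Int → Int → Int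
  | 0, _, _, _ => 0
  | fuel + 1, Ds, V, new =>
      let possible_values := pvGetAllPossibleSums Ds
      let miss := pvGetMissingPossibleSums possible_values V
      if miss = -1 then new
      else pvLoopA fuel (Ds ++ [miss]) V (new + 1)

def solveCAlgo (C : Int) (Ds : List Int) (V : Int) : Int :=
  pvLoopA (V.toNat + 2) Ds V 0

-- ===== PORT B =====
-- the 'for d in coins' greedy scan with its break
def pvCover : List Int → Int → Int
  | [], covered => covered
  | d :: t, covered => if d > covered + 1 then covered else pvCover t (covered + d)

-- the 'while True' loop of B; fuel is a totality guard exactly as in port A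
def pvLoopB : Nat → List Int → Int → Int → Int
  | 0, _, _, _ => 0
  | fuel + 1, coins, V, added =>
      let covered := pvCover coins 0
      if covered ≥ V then added
      else pvLoopB fuel (PySem.List.sorted (coins ++ [covered + 1]) (fun x => x)) V (added + 1)

def solveCAlgo_alt (C : Int) (Ds : List Int) (V : Int) : Int :=
  pvLoopB (V.toNat + 2) (PySem.List.sorted (PySem.Set.ofList Ds) (fun x => x)) V 0

-- ===== PRECONDITION & SPEC =====
-- A terminates exactly when every denomination is positive: with any d ≤ 0 the minimal
-- subset sum never lets the scan pass 1, the same 'miss' is re-added forever and the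
-- while-loop never exits, so those inputs (where A diverges) are the only ones excluded.
def Pre_solveCAlgo (C : Int) (Ds : List Int) (V : Int) : Prop := ∀ d ∈ Ds, 1 ≤ d
instance (C : Int) (Ds : List Int) (V : Int) : Decidable (Pre_solveCAlgo C Ds V) := by unfold Pre_solveCAlgo; infer_instance

def pvWitness_solveCAlgo : Int × List Int × Int := (0, [1, 2], 4)

-- For V ≤ 0 with a non-empty Ds not containing 1, A first patches in the coin 1 and only
-- then notices nothing is required and returns 1; B returns 0, the intended answer,
-- since no sums 1..V are required when V ≤ 0.
def D_solveCAlgo (C : Int) (Ds : List Int) (V : Int) : Prop := V ≤ 0 ∧ Ds ≠ [] ∧ (1 : Int) ∉ Ds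
instance (C : Int) (Ds : List Int) (V : Int) : Decidable (D_solveCAlgo C Ds V) := by unfold D_solveCAlgo; infer_instance

def Spec_solveCAlgo (C : Int) (Ds : List Int) (V : Int) (out : Int) : Prop := ¬ D_solveCAlgo C Ds V → out = solveCAlgo_alt C Ds V
instance (C : Int) (Ds : List Int) (V : Int) (out : Int) : Decidable (Spec_solveCAlgo C Ds V out) := by unfold Spec_solveCAlgo; infer_instance

def pvDiffWitness_solveCAlgo : Int × List Int × Int := (0, [2], 0)
def pvDiffWitnessOut_solveCAlgo : Int × Int := (1, 0)

-- ===== CLAIM (what is proved, stated in full; the proofs are below) =====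
def Claim_unchanged_solveCAlgo : Prop := ∀ (C : Int) (Ds : List Int) (V : Int), Dom_solveCAlgo C Ds V → Pre_solveCAlgo C Ds V → Spec_solveCAlgo C Ds V (solveCAlgo C Ds V)
def Claim_changed_solveCAlgo : Prop := Dom_solveCAlgo (pvDiffWitness_solveCAlgo.1) (pvDiffWitness_solveCAlgo.2.1) (pvDiffWitness_solveCAlgo.2.2) ∧ Pre_solveCAlgo (pvDiffWitness_solveCAlgo.1) (pvDiffWitness_solveCAlgo.2.1) (pvDiffWitness_solveCAlgo.2.2) ∧ D_solveCAlgo (pvDiffWitness_solveCAlgo.1) (pvDiffWitness_solveCAlgo.2.1) (pvDiffWitness_solveCAlgo.2.2) ∧ solveCAlgo (pvDiffWitness_solveCAlgo.1) (pvDiffWitness_solveCAlgo.2.1) (pvDiffWitness_solveCAlgo.2.2) = pvDiffWitnessOut_solveCAlgo.1 ∧ solveCAlgo_alt (pvDiffWitness_solveCAlgo.1) (pvDiffWitness_solveCAlgo.2.1) (pvDiffWitness_solveCAlgo.2.2) = pvDiffWitnessOut_solveCAlgo.2 ∧ pvDiffWitnessOut_solveCAlgo.1 ≠ pvDiffWi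tnessOut_solveCAlgo.2
def Claim_exact_solveCAlgo : Prop := ∀ (C : Int) (Ds : List Int) (V : Int), Dom_solveCAlgo C Ds V → Pre_solveCAlgo C Ds V → D_solveCAlgo C Ds V → solveCAlgo C Ds V ≠ solveCAlgo_alt C Ds V

-- ===== LEMMAS AND PROOFS =====

-- abbreviations used only by the proofs
def pvSL (Ds : List Int) : List Int := PySem.List.sorted (PySem.Set.ofList Ds) (fun x => x)
def pvC (Ds : List Int) : Int := pvCover (pvSL Ds) 0

theorem mem_pvSL (Ds : List Int) (x : Int) : x ∈ pvSL Ds ↔ x ∈ Ds := by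
  rw [pvSL, PySem.List.mem_sorted, PySem.Set.mem_ofList]

theorem pvSL_pairwise (Ds : List Int) : (pvSL Ds).Pairwise (· < ·) :=
  PySem.List.sorted_ofList_pairwise_lt Ds

-- the greedy cover never drops below its start when all coins are positive
theorem pvCover_ge (L : List Int) : ∀ (c : Int), (∀ d ∈ L, 1 ≤ d) → c ≤ pvCover L c := by
  induction L with
  | nil => intro c _; simp [pvCover]
  | cons d t ih =>
      intro c h
      simp only [pvCover]
      split
      · exact le_refl c
      · have hd : 1 ≤ d := h d (by simp)
        have := ih (c + d) (fun x hx => h x (by simp [hx]))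
        omega

theorem pvC_nonneg (Ds : List Int) (h : ∀ d ∈ Ds, 1 ≤ d) : 0 ≤ pvC Ds :=
  pvCover_ge _ 0 (fun d hd => h d ((mem_pvSL Ds d).mp hd))

-- membership in pvCombos = sublists of the given length
theorem mem_pvCombos (xs : List Int) : ∀ (n : Nat) (l : List Int),
    l ∈ pvCombos xs n ↔ l.Sublist xs ∧ l.length = n := by
  induction xs with
  | nil =>
      intro n l
      cases n with
      | zero => simp [pvCombos]
      | succ n =>
          simp only [pvCombos, List.not_mem_nil, false_iff, not_and]
          intro hs
          simp [List.sublist_nil.mp hs]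
  | cons x t ih =>
      intro n l
      cases n with
      | zero =>
          constructor
          · intro h
            simp [pvCombos] at h
            simp [h]
          · rintro ⟨hs, hl⟩
            have := List.length_eq_zero_iff.mp hl
            simp [pvCombos, this]
      | succ n =>
          simp only [pvCombos, List.mem_append, List.mem_map]
          constructor
          · rintro (⟨l', hl', rfl⟩ | h)
            · rcases (ih n l').mp hl' with ⟨hs, hlen⟩
              exact ⟨List.Sublist.cons₂ x hs, by simp [hlen]⟩
            · rcases (ih (n+1) l).mp h with ⟨hs, hlen⟩
              exact ⟨hs.cons x, hlen⟩
          · rintro ⟨hs, hlen⟩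
            rcases List.sublist_cons_iff.mp hs with h | ⟨r, rfl, hr⟩
            · exact Or.inr ((ih (n+1) l).mpr ⟨h, hlen⟩)
            · exact Or.inl ⟨r, (ih n r).mpr ⟨hr, by simpa using hlen⟩, rfl⟩

theorem mem_foldl_add (L : List (List Int)) : ∀ (s : PySem.Set Int) (x : Int),
    x ∈ L.foldl (fun pv b => PySem.Set.add pv b.sum) s ↔ x ∈ s ∨ ∃ b ∈ L, b.sum = x := by
  induction L with
  | nil => simp
  | cons b t ih =>
      intro s x
      simp only [List.foldl_cons, ih, PySem.Set.mem_add]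
      constructor
      · rintro (⟨h | h⟩ | ⟨b', hb', rfl⟩)
        · exact Or.inl h
        · exact Or.inr ⟨b, by simp, h.symm⟩
        · exact Or.inr ⟨b', by simp [hb'], rfl⟩
      · rintro (h | ⟨b', hb', rfl⟩)
        · exact Or.inl (Or.inl h)
        · rcases List.mem_cons.mp hb' with rfl | hb'
          · exact Or.inl (Or.inr rfl)
          · exact Or.inr ⟨b', hb', rfl⟩

theorem mem_foldl_nested (g : Int → PySem.Set (List Int)) (L : List Int) :
    ∀ (s : PySem.Set Int) (x : Int),
    x ∈ L.foldl (fun pv n => (g n).foldl (fun pv b => PySem.Set.add pv b.sum) pv) s ↔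
      x ∈ s ∨ ∃ n ∈ L, ∃ b ∈ g n, b.sum = x := by
  induction L with
  | nil => simp
  | cons n t ih =>
      intro s x
      simp only [List.foldl_cons, ih, mem_foldl_add]
      constructor
      · rintro (⟨h | ⟨b, hb, rfl⟩⟩ | ⟨n', hn', hb⟩)
        · exact Or.inl h
        · exact Or.inr ⟨n, by simp, b, hb, rfl⟩
        · exact Or.inr ⟨n', by simp [hn'], hb⟩
      · rintro (h | ⟨n', hn', hb⟩)
        · exact Or.inl (Or.inl h)
        · rcases List.mem_cons.mp hn' with rfl | hn'
          · exact Or.inl (Or.inr hb)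
          · exact Or.inr ⟨n', hn', hb⟩

theorem mem_pvGetAllPossibleSums (Ds : List Int) (x : Int) :
    x ∈ pvGetAllPossibleSums Ds ↔
      ∃ l : List Int, l ≠ [] ∧ l.Sublist (PySem.Set.ofList Ds) ∧ l.sum = x := by
  unfold pvGetAllPossibleSums
  rw [mem_foldl_nested]
  simp only [PySem.Set.empty, List.not_mem_nil, false_or]
  constructor
  · rintro ⟨n, hn, b, hb, rfl⟩
    rw [PySem.List.mem_pyRange_one] at hn
    rw [pvFindsubsets, PySem.Set.mem_ofList, mem_pvCombos] at hb
    refine ⟨b, ?_, hb.1, rfl⟩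
    intro hnil
    have := hb.2
    rw [hnil] at this
    simp at this
    omega
  · rintro ⟨l, hnil, hs, rfl⟩
    refine ⟨(l.length : Int), ?_, l, ?_, rfl⟩
    · rw [PySem.List.mem_pyRange_one]
      have h1 : 1 ≤ l.length := List.length_pos_iff.mpr hnil
      have h2 : l.length ≤ (PySem.Set.ofList Ds).length := hs.length_le
      omega
    · rw [pvFindsubsets, PySem.Set.mem_ofList, mem_pvCombos]
      exact ⟨hs, by simp⟩

-- reachability: every value below the greedy cover is (sublist sum) + (remainder ≤ c)
theorem pvCover_reach (L : List Int) : ∀ (c m : Int), (∀ d ∈ L, 1 ≤ d) → 0 ≤ c →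
    0 ≤ m → m ≤ pvCover L c → ∃ l : List Int, l.Sublist L ∧ 0 ≤ m - l.sum ∧ m - l.sum ≤ c := by
  induction L with
  | nil =>
      intro c m _ _ hm hmc
      exact ⟨[], List.Sublist.refl _, by simpa using hm, by simpa using hmc⟩
  | cons d t ih =>
      intro c m h hc hm hmc
      have hd : 1 ≤ d := h d (by simp)
      have ht : ∀ x ∈ t, 1 ≤ x := fun x hx => h x (by simp [hx])
      by_cases hgap : d > c + 1
      · simp only [pvCover, if_pos hgap] at hmc
        exact ⟨[], (List.nil_sublist _), by simpa using hm, by simpa using hmc⟩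
      · simp only [pvCover, if_neg hgap] at hmc
        rcases ih (c + d) m ht (by omega) hm hmc with ⟨l, hl, h0, h1⟩
        by_cases hsmall : m - l.sum ≤ c
        · exact ⟨l, hl.cons d, h0, hsmall⟩
        · refine ⟨d :: l, List.Sublist.cons₂ d hl, ?_, ?_⟩ <;> simp only [List.sum_cons] <;> omega

theorem sum_pos_of_mem (l : List Int) (h1 : ∀ x ∈ l, 1 ≤ x) (hne : l ≠ []) : 1 ≤ l.sum := by
  cases l with
  | nil => simp at hne
  | cons y ys =>
      have : (0:Int) ≤ ys.sum := List.sum_nonneg (fun x hx => le_trans (by norm_num) (h1 x (by simp [hx])))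
      have := h1 y (by simp)
      simp only [List.sum_cons]; omega

-- unreachability: cover+1 is not (sublist sum) + (remainder ≤ c)
theorem pvCover_unreach (L : List Int) : ∀ (c r : Int), L.Pairwise (· < ·) → (∀ d ∈ L, 1 ≤ d) →
    0 ≤ c → 0 ≤ r → r ≤ c → ∀ l : List Int, l.Sublist L → r + l.sum ≠ pvCover L c + 1 := by
  induction L with
  | nil =>
      intro c r _ _ _ hr hrc l hl
      rw [List.sublist_nil.mp hl]
      simp [pvCover]; omega
  | cons d t ih =>
      intro c r hpw h hc hr hrc l hl
      have hd : 1 ≤ d := h d (by simp)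
      have ht : ∀ x ∈ t, 1 ≤ x := fun x hx => h x (by simp [hx])
      have hpt : t.Pairwise (· < ·) := hpw.of_cons
      have hdt : ∀ x ∈ t, d < x := fun x hx => (List.pairwise_cons.mp hpw).1 x hx
      by_cases hgap : d > c + 1
      · simp only [pvCover, if_pos hgap]
        rcases List.sublist_cons_iff.mp hl with h' | ⟨r', rfl, hr'⟩
        · cases l with
          | nil => simp; omega
          | cons y ys =>
              have hy : d < y := hdt y (h'.subset (by simp))
              have : (0:Int) ≤ ys.sum := List.sum_nonneg (fun x hx =>
                le_trans (by norm_num) (ht x (h'.subset (by simp [hx]))))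
              simp only [List.sum_cons]; omega
        · have hys : (0:Int) ≤ r'.sum := List.sum_nonneg (fun x hx => le_trans (by norm_num) (ht x (hr'.subset hx)))
          simp only [List.sum_cons]; omega
      · simp only [pvCover, if_neg hgap]
        rcases List.sublist_cons_iff.mp hl with h' | ⟨r', rfl, hr'⟩
        · exact ih (c + d) r hpt ht (by omega) hr (by omega) l h'
        · have := ih (c + d) (r + d) hpt ht (by omega) (by omega) (by omega) r' hr'
          simp only [List.sum_cons]; omega

-- the scan of GetMissingPossibleSums, characterised by the covered prefix
theorem pvGmps_eq (M : List Int) : ∀ (prev cc V : Int), M.Pairwise (· < ·) →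
    (∀ x ∈ M, prev < x) → (∀ m, prev < m → m ≤ cc → m ∈ M) → cc + 1 ∉ M → prev ≤ cc →
    pvGmps M prev V = if prev < cc ∧ V ≤ cc then -1 else if M = [] ∧ ¬ prev < V then -1 else cc + 1 := by
  induction M with
  | nil =>
      intro prev cc V _ _ hm _ hpc
      have hcc : cc = prev := by
        by_contra hne
        have : prev < cc := by omega
        exact (List.not_mem_nil (a := prev + 1)) (hm (prev + 1) (by omega) (by omega))
      subst hcc
      simp only [pvGmps]
      split_ifs with h1 h2 h3 <;> simp_all
  | cons s t ih =>
      intro prev cc V hpw hgt hm hnot hpc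
      have hs : prev < s := hgt s (by simp)
      have hsne : s ≠ cc + 1 := fun h => hnot (by simp [h])
      by_cases hlt : prev < cc
      · have hmem : prev + 1 ∈ s :: t := hm (prev + 1) (by omega) (by omega)
        have hhead : s = prev + 1 := by
          rcases List.mem_cons.mp hmem with h | h
          · omega
          · have := (List.pairwise_cons.mp hpw).1 _ h
            omega
        subst hhead
        simp only [pvGmps, ne_eq, not_true_eq_false, if_false]
        by_cases hV : prev + 1 ≥ V
        · rw [if_pos hV, if_pos ⟨hlt, by omega⟩]
        · rw [if_neg hV]
          have ihres := ih (prev + 1) cc V hpw.of_cons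
            (fun x hx => (List.pairwise_cons.mp hpw).1 x hx)
            (fun m h1 h2 => by
              rcases List.mem_cons.mp (hm m (by omega) h2) with h | h
              · omega
              · exact h)
            (fun h => hnot (by simp [h]))
            (by omega)
          rw [ihres]
          by_cases hVc : V ≤ cc
          · rw [if_pos ⟨by omega, hVc⟩, if_pos ⟨hlt, hVc⟩]
          · rw [if_neg (fun hh => hVc hh.2), if_neg (fun hh => hh.2 (by omega)),
                if_neg (fun hh => hVc hh.2), if_neg (fun hh => by simp at hh)]
      · have hcc : cc = prev := by omega
        have hne : s ≠ prev + 1 := by omega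
        simp only [pvGmps, if_pos hne]
        rw [if_neg (fun hh => hlt hh.1), if_neg (fun hh => by simp at hh)]
        omega

-- sublist sums transfer across a permutation of the ambient list
theorem sublist_sum_transfer {L1 L2 : List Int} (hp : L1.Perm L2) {l : List Int}
    (hl : l.Sublist L1) : ∃ l' : List Int, l'.Sublist L2 ∧ l'.sum = l.sum ∧ l'.length = l.length := by
  have h1 : l.Subperm L2 := (hl.subperm).trans hp.subperm
  rcases h1 with ⟨l', hperm, hsub⟩
  exact ⟨l', hsub, hperm.sum_eq, hperm.length_eq⟩

-- a sum set membership transferred to the sorted list of distinct denominations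
theorem mem_sums_iff_sublist_pvSL (Ds : List Int) (x : Int) :
    x ∈ pvGetAllPossibleSums Ds ↔
      ∃ l : List Int, l ≠ [] ∧ l.Sublist (pvSL Ds) ∧ l.sum = x := by
  rw [mem_pvGetAllPossibleSums]
  have hp : (PySem.Set.ofList Ds : List Int).Perm (pvSL Ds) :=
    (PySem.List.sorted_perm (PySem.Set.ofList Ds) (fun x : Int => x) false).symm
  constructor
  · rintro ⟨l, hne, hs, rfl⟩
    rcases sublist_sum_transfer hp hs with ⟨l', h1, h2, h3⟩
    exact ⟨l', by intro hh; rw [hh] at h3; exact hne (List.length_eq_zero_iff.mp h3.symm), h1, h2⟩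
  · rintro ⟨l, hne, hs, rfl⟩
    rcases sublist_sum_transfer hp.symm hs with ⟨l', h1, h2, h3⟩
    exact ⟨l', by intro hh; rw [hh] at h3; exact hne (List.length_eq_zero_iff.mp h3.symm), h1, h2⟩

theorem nodup_foldl_add (B : List (List Int)) : ∀ (s : PySem.Set Int), s.Nodup →
    (B.foldl (fun pv b => PySem.Set.add pv b.sum) s).Nodup := by
  induction B with
  | nil => intro s hs; exact hs
  | cons b tb ih => intro s hs; exact ih _ (PySem.Set.nodup_add _ _ hs)

theorem nodup_foldl_nested (g : Int → List (List Int)) (L : List Int) : ∀ (s : PySem.Set Int), s.Nodup →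
    (L.foldl (fun pv n => (g n).foldl (fun pv b => PySem.Set.add pv b.sum) pv) s).Nodup := by
  induction L with
  | nil => intro s hs; exact hs
  | cons n t ih => intro s hs; exact ih _ (nodup_foldl_add _ _ hs)

theorem nodup_sums (Ds : List Int) : (pvGetAllPossibleSums Ds).Nodup := by
  unfold pvGetAllPossibleSums
  exact nodup_foldl_nested _ _ _ (by simp [PySem.Set.empty])

-- the central per-round characterisation of A's 'miss'
theorem miss_eq (Ds : List Int) (V : Int) (hpre : ∀ d ∈ Ds, 1 ≤ d) :
    pvGetMissingPossibleSums (pvGetAllPossibleSums Ds) V =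
      if 0 < pvC Ds ∧ V ≤ pvC Ds then -1
      else if Ds = [] ∧ ¬ (0:Int) < V then -1
      else pvC Ds + 1 := by
  have hSL1 : ∀ d ∈ pvSL Ds, 1 ≤ d := fun d hd => hpre d ((mem_pvSL Ds d).mp hd)
  have hc0 : 0 ≤ pvC Ds := pvC_nonneg Ds hpre
  unfold pvGetMissingPossibleSums
  set M := PySem.List.sorted (pvGetAllPossibleSums Ds) (fun x => x) with hM
  have hmemM : ∀ x, x ∈ M ↔ x ∈ pvGetAllPossibleSums Ds := fun x =>
    PySem.List.mem_sorted _ _ _ x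
  have hMpw : M.Pairwise (· < ·) := by
    have hle : M.Pairwise (fun a b => a ≤ b) := PySem.List.sorted_pairwise _ (fun x => x)
    have hnd : M.Nodup := ((PySem.List.sorted_perm _ _ _).nodup_iff).mpr (nodup_sums Ds)
    exact (hle.and hnd).imp (fun {a b} hab => lt_of_le_of_ne hab.1 hab.2)
  have hpos : ∀ x ∈ M, (0:Int) < x := by
    intro x hx
    rcases (mem_pvGetAllPossibleSums Ds x).mp ((hmemM x).mp hx) with ⟨l, hne, hs, rfl⟩
    have : ∀ y ∈ l, (1:Int) ≤ y := fun y hy =>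
      hpre y ((PySem.Set.mem_ofList Ds y).mp (hs.subset hy))
    have := sum_pos_of_mem l this hne
    omega
  have hreach : ∀ m : Int, 0 < m → m ≤ pvC Ds → m ∈ M := by
    intro m h1 h2
    rcases pvCover_reach (pvSL Ds) 0 m hSL1 le_rfl (by omega) h2 with ⟨l, hl, ha, hb⟩
    have hsum : l.sum = m := by omega
    have hlne : l ≠ [] := by
      intro hh; rw [hh] at hsum; simp at hsum; omega
    exact (hmemM m).mpr ((mem_sums_iff_sublist_pvSL Ds m).mpr ⟨l, hlne, hl, hsum⟩)
  have hunreach : pvC Ds + 1 ∉ M := by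
    intro hx
    rcases (mem_sums_iff_sublist_pvSL Ds _).mp ((hmemM _).mp hx) with ⟨l, hne, hs, hsum⟩
    have heq : (0:Int) + l.sum = pvCover (pvSL Ds) 0 + 1 := by
      rw [show pvCover (pvSL Ds) 0 = pvC Ds from rfl]; omega
    exact pvCover_unreach (pvSL Ds) 0 0 (pvSL_pairwise Ds) hSL1 le_rfl le_rfl le_rfl l hs heq
  have hMnil : M = [] ↔ Ds = [] := by
    constructor
    · intro hh
      cases hDs : Ds with
      | nil => rfl
      | cons d t =>
          exfalso
          have : d ∈ pvGetAllPossibleSums Ds := by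
            rw [mem_pvGetAllPossibleSums]
            exact ⟨[d], by simp,
              List.singleton_sublist.mpr ((PySem.Set.mem_ofList Ds d).mpr (by simp [hDs])), by simp⟩
          rw [← hmemM d, hh] at this
          simp at this
    · intro hh
      subst hh
      rw [hM, PySem.List.sorted_eq_nil_iff]
      rfl
  rw [pvGmps_eq M 0 (pvC Ds) V hMpw hpos hreach hunreach hc0]
  by_cases h1 : 0 < pvC Ds ∧ V ≤ pvC Ds
  · rw [if_pos h1, if_pos h1]
  · rw [if_neg h1, if_neg h1]
    by_cases h2 : Ds = [] ∧ ¬ (0:Int) < V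
    · rw [if_pos ⟨hMnil.mpr h2.1, h2.2⟩, if_pos h2]
    · rw [if_neg (fun hh => h2 ⟨hMnil.mp hh.1, hh.2⟩), if_neg h2]

-- appending the fresh coin pvC+1 to Ds extends the distinct set by exactly that element
theorem coin_not_mem (Ds : List Int) (hpre : ∀ d ∈ Ds, 1 ≤ d) : pvC Ds + 1 ∉ Ds := by
  intro hmem
  have hx : pvC Ds + 1 ∈ pvGetAllPossibleSums Ds := by
    rw [mem_pvGetAllPossibleSums]
    exact ⟨[pvC Ds + 1], by simp, List.singleton_sublist.mpr ((PySem.Set.mem_ofList _ _).mpr hmem), by simp⟩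
  rcases (mem_sums_iff_sublist_pvSL Ds _).mp hx with ⟨l, hne, hs, hsum⟩
  have heq : (0:Int) + l.sum = pvCover (pvSL Ds) 0 + 1 := by
    rw [show pvCover (pvSL Ds) 0 = pvC Ds from rfl]; omega
  exact pvCover_unreach (pvSL Ds) 0 0 (pvSL_pairwise Ds)
    (fun d hd => hpre d ((mem_pvSL Ds d).mp hd)) le_rfl le_rfl le_rfl l hs heq

theorem ofList_append_notmem (Ds : List Int) (m : Int) (hm : m ∉ Ds) :
    PySem.Set.ofList (Ds ++ [m]) = PySem.Set.ofList Ds ++ [m] := by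
  rw [PySem.Set.ofList_eq_foldl, List.foldl_append, ← PySem.Set.ofList_eq_foldl]
  show PySem.Set.add (PySem.Set.ofList Ds) m = _
  have : m ∉ PySem.Set.ofList Ds := fun hh => hm ((PySem.Set.mem_ofList Ds m).mp hh)
  simp [PySem.Set.add, PySem.Set.contains, this]

-- B's re-sorted coin list after a patch is exactly pvSL of A's extended Ds
theorem next_coins_eq (Ds : List Int) (hpre : ∀ d ∈ Ds, 1 ≤ d) :
    PySem.List.sorted (pvSL Ds ++ [pvC Ds + 1]) (fun x => x) = pvSL (Ds ++ [pvC Ds + 1]) := by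
  simp only [pvSL]
  rw [ofList_append_notmem Ds _ (coin_not_mem Ds hpre)]
  exact PySem.List.sorted_eq_sorted_of_perm _ _ _ (fun a b h => h)
    ((PySem.List.sorted_perm (PySem.Set.ofList Ds) (fun x : Int => x) false).append_right [pvC Ds + 1])

-- one-round unfoldings of the two loops
theorem pvLoopA_succ (f : Nat) (Ds : List Int) (V new : Int) :
    pvLoopA (f + 1) Ds V new =
      if pvGetMissingPossibleSums (pvGetAllPossibleSums Ds) V = -1 then new
      else pvLoopA f (Ds ++ [pvGetMissingPossibleSums (pvGetAllPossibleSums Ds) V]) V (new + 1) := rfl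

theorem pvLoopB_succ (f : Nat) (coins : List Int) (V added : Int) :
    pvLoopB (f + 1) coins V added =
      if pvCover coins 0 ≥ V then added
      else pvLoopB f (PySem.List.sorted (coins ++ [pvCover coins 0 + 1]) (fun x => x)) V (added + 1) := rfl

-- the loops run in lock-step for V ≥ 1
theorem loopAB (V : Int) (hV : 0 < V) : ∀ (fuel : Nat) (Ds : List Int) (new : Int),
    (∀ d ∈ Ds, 1 ≤ d) → pvLoopA fuel Ds V new = pvLoopB fuel (pvSL Ds) V new := by
  intro fuel
  induction fuel with
  | zero => intro Ds new _; rfl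
  | succ f ih =>
      intro Ds new hpre
      have hc0 : 0 ≤ pvC Ds := pvC_nonneg Ds hpre
      by_cases hstop : V ≤ pvC Ds
      · have hmiss : pvGetMissingPossibleSums (pvGetAllPossibleSums Ds) V = -1 := by
          rw [miss_eq Ds V hpre, if_pos ⟨by omega, hstop⟩]
        rw [pvLoopA_succ, hmiss, if_pos rfl, pvLoopB_succ,
            if_pos (show pvCover (pvSL Ds) 0 ≥ V from hstop)]
      · have hmiss : pvGetMissingPossibleSums (pvGetAllPossibleSums Ds) V = pvC Ds + 1 := by
          rw [miss_eq Ds V hpre, if_neg (fun hh => hstop hh.2), if_neg (fun hh => hh.2 hV)]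
        have hnext : ∀ d ∈ Ds ++ [pvC Ds + 1], (1:Int) ≤ d := by
          intro d hd
          rcases List.mem_append.mp hd with h | h
          · exact hpre d h
          · simp at h; omega
        rw [pvLoopA_succ, hmiss, if_neg (by omega : ¬(pvC Ds + 1 = -1)), pvLoopB_succ,
            if_neg (show ¬ pvCover (pvSL Ds) 0 ≥ V from hstop),
            show pvCover (pvSL Ds) 0 + 1 = pvC Ds + 1 from rfl, next_coins_eq Ds hpre]
        exact ih _ _ hnext

-- if 1 is a denomination the cover is at least 1
theorem pvC_pos_of_one_mem (Ds : List Int) (hpre : ∀ d ∈ Ds, 1 ≤ d) (h1 : (1:Int) ∈ Ds) :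
    1 ≤ pvC Ds := by
  have h1' : (1:Int) ∈ pvSL Ds := (mem_pvSL Ds 1).mpr h1
  show 1 ≤ pvCover (pvSL Ds) 0
  cases hL : pvSL Ds with
  | nil => rw [hL] at h1'; simp at h1'
  | cons h t =>
      have hpw := pvSL_pairwise Ds
      rw [hL] at hpw h1'
      have hh : h = 1 := by
        rcases List.mem_cons.mp h1' with hh | hh
        · omega
        · have := (List.pairwise_cons.mp hpw).1 _ hh
          have := hpre h ((mem_pvSL Ds h).mp (by rw [hL]; simp))
          omega
      subst hh
      simp only [pvCover]
      rw [if_neg (by omega : ¬((1:Int) > 0 + 1))]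
      have : ∀ x ∈ t, (1:Int) ≤ x := by
        intro x hx
        exact hpre x ((mem_pvSL Ds x).mp (by rw [hL]; simp [hx]))
      have := pvCover_ge t (0 + 1) this
      omega

-- if no denomination is 1 the cover is 0
theorem pvC_zero_of_one_notmem (Ds : List Int) (hpre : ∀ d ∈ Ds, 1 ≤ d) (h1 : (1:Int) ∉ Ds) :
    pvC Ds = 0 := by
  show pvCover (pvSL Ds) 0 = 0
  cases hL : pvSL Ds with
  | nil => rfl
  | cons h t =>
      have hmem : h ∈ Ds := (mem_pvSL Ds h).mp (by rw [hL]; simp)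
      have : (2:Int) ≤ h := by
        have := hpre h hmem
        rcases lt_or_eq_of_le this with hlt | heq
        · omega
        · exact absurd (heq ▸ hmem) h1
      simp only [pvCover]
      rw [if_pos (by omega : h > 0 + 1)]


-- ===== VERDICT (by name: the statement is the Claim_ definition above) =====
theorem solveCAlgo_spec : Claim_unchanged_solveCAlgo := by
  unfold Claim_unchanged_solveCAlgo
  intro C Ds V _ hpre
  unfold Spec_solveCAlgo
  intro hnd
  unfold solveCAlgo solveCAlgo_alt
  show pvLoopA (V.toNat + 2) Ds V 0 = pvLoopB (V.toNat + 2) (pvSL Ds) V 0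
  by_cases hV : 0 < V
  · exact loopAB V hV _ Ds 0 hpre
  · have hfuel : V.toNat = 0 := Int.toNat_of_nonpos (by omega)
    have hcase : Ds = [] ∨ (1:Int) ∈ Ds := by
      unfold D_solveCAlgo at hnd
      by_cases hds : Ds = []
      · exact Or.inl hds
      · by_cases h1 : (1:Int) ∈ Ds
        · exact Or.inr h1
        · exact absurd ⟨by omega, hds, h1⟩ hnd
    have hc0 : 0 ≤ pvC Ds := pvC_nonneg Ds hpre
    have hmiss : pvGetMissingPossibleSums (pvGetAllPossibleSums Ds) V = -1 := by
      rw [miss_eq Ds V hpre]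
      rcases hcase with h | h
      · have hc : pvC Ds = 0 := by subst h; rfl
        rw [if_neg (fun hh => by omega), if_pos ⟨h, by omega⟩]
      · have := pvC_pos_of_one_mem Ds hpre h
        rw [if_pos ⟨by omega, by omega⟩]
    rw [hfuel, show (0:Nat) + 2 = 1 + 1 from rfl, pvLoopA_succ, hmiss, if_pos rfl,
        pvLoopB_succ, if_pos (show pvCover (pvSL Ds) 0 ≥ V by have : pvCover (pvSL Ds) 0 = pvC Ds := rfl; omega)]

theorem solveCAlgo_changed : Claim_changed_solveCAlgo := by
  unfold Claim_changed_solveCAlgo; decide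

theorem solveCAlgo_tight : Claim_exact_solveCAlgo := by
  unfold Claim_exact_solveCAlgo
  intro C Ds V _ hpre hd
  unfold D_solveCAlgo at hd
  obtain ⟨hV, hne, h1⟩ := hd
  unfold solveCAlgo solveCAlgo_alt
  show pvLoopA (V.toNat + 2) Ds V 0 ≠ pvLoopB (V.toNat + 2) (pvSL Ds) V 0
  have hfuel : V.toNat = 0 := Int.toNat_of_nonpos hV
  have hc : pvC Ds = 0 := pvC_zero_of_one_notmem Ds hpre h1
  have hmiss : pvGetMissingPossibleSums (pvGetAllPossibleSums Ds) V = 1 := by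
    rw [miss_eq Ds V hpre, if_neg (fun hh => by omega), if_neg (fun hh => hne hh.1)]
    omega
  have hpre2 : ∀ d ∈ Ds ++ [(1:Int)], (1:Int) ≤ d := by
    intro d hd'
    rcases List.mem_append.mp hd' with h | h
    · exact hpre d h
    · simp at h; omega
  have hc2 : 1 ≤ pvC (Ds ++ [(1:Int)]) := pvC_pos_of_one_mem _ hpre2 (by simp)
  have hmiss2 : pvGetMissingPossibleSums (pvGetAllPossibleSums (Ds ++ [(1:Int)])) V = -1 := by
    rw [miss_eq _ V hpre2, if_pos ⟨by omega, by omega⟩]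
  rw [hfuel, show (0:Nat) + 2 = 1 + 1 from rfl, pvLoopA_succ, hmiss,
      if_neg (by omega : ¬(1:Int) = -1), show (1:Nat) = 0 + 1 from rfl, pvLoopA_succ, hmiss2,
      if_pos rfl, pvLoopB_succ,
      if_pos (show pvCover (pvSL Ds) 0 ≥ V by have : pvCover (pvSL Ds) 0 = pvC Ds := rfl; omega)]
  omega
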